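-- pv_equiv track=rewrite | github.com/MahmoudKebbi/System_Reliability_Analysis | src/algorithms/cutset/bdd.py | _minimize_cut_sets
-- ===== SOURCE A (Python) =====
-- from typing import List, Set, Dict, Tuple, Optional
--
-- def _minimize_cut_sets(cut_sets: List[Set[str]]) -> List[Set[str]]:
--     """More efficient algorithm to find minimal cut sets"""
--     if not cut_sets:
--         return []
--
--     # Sort by size for efficiency (check smaller sets first)
--     cut_sets.sort(key=len)
--
--     minimal_cs = []
--     for i, cs in enumerate(cut_sets):
--         # Skip if this set is already known to be non-minimal
--         if any(existing_cs.issubset(cs) for existing_cs in minimal_cs):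
--             continue
--
--         # Check if this set is a subset of any remaining sets
--         is_minimal = True
--         for j in range(i + 1, len(cut_sets)):
--             # If this set is a subset of a larger set, mark the larger as non-minimal
--             if cs.issubset(cut_sets[j]):
--                 is_minimal = True
--                 # No need to check other sets
--                 break
--
--         if is_minimal:
--             minimal_cs.append(cs)
--
--     return minimal_cs
-- ===== SOURCE B (Python) =====
-- from typing import List, Set
--
-- def _minimize_cut_sets(cut_sets: List[Set[str]]) -> List[Set[str]]:
--     """Sort in place (same side effect as A), deduplicate preserving order,
--     then keep every set that has no proper subset among the unique sets."""
--     cut_sets.sort(key=len)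
--     unique = []
--     for cs in cut_sets:
--         if cs not in unique:
--             unique.append(cs)
--     return [s for s in unique if not any(t < s for t in unique)]
-- ===== Notes on version B (the rewrite author's own statement) =====
-- stated objective: simpler
-- what changed: Replaces A's incremental kept-list filter with its dead inner loop by an explicit dedup pass followed by one global proper-subset minimality filter over the unique sets.
import Mathlib
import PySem

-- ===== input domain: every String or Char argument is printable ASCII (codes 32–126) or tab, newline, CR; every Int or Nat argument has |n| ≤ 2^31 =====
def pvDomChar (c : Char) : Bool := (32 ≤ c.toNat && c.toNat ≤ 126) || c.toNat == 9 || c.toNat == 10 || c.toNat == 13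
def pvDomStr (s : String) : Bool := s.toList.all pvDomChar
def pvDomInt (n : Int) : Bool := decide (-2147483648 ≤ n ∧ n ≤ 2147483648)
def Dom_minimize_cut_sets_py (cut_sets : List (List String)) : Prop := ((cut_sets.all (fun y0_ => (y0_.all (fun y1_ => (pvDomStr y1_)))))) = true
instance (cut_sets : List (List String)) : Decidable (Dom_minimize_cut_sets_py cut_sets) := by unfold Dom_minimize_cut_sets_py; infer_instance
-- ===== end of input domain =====

-- Both ports: inner `List String` values stand for Python sets (distinct elements as a set);
-- len/issubset/==/< on them are the set operations, via PySem.Set.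
-- B is a simpler decomposition (dedup pass + one global minimality filter); the in-place
-- `cut_sets.sort(key=len)` mutation of the Python argument is preserved by B; the theorems
-- here are about the RETURN value only.
def pyLen (s : List String) : Nat := (PySem.Set.ofList s).length
def pySub (a b : List String) : Bool := PySem.Set.issubset (PySem.Set.ofList a) b

-- ===== PORT A =====
-- inner `for j in range(i+1, …)` loop over the suffix; `is_minimal` starts true and the
-- loop only ever sets it to true again before breaking
def aInner (cs : List String) : List (List String) → Bool
  | [] => true
  | t :: ts => if pySub cs t then true else aInner cs ts

def aLoop : List (List String) → List (List String) → List (List String)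
  | minimal, [] => minimal
  | minimal, cs :: rest =>
    if minimal.any (fun t => pySub t cs) then aLoop minimal rest
    else if aInner cs rest then aLoop (minimal ++ [cs]) rest
    else aLoop minimal rest

def minimize_cut_sets_py (cut_sets : List (List String)) : List (List String) :=
  if cut_sets.isEmpty then []
  else aLoop [] (PySem.List.sorted cut_sets (fun s => pyLen s))

-- ===== PORT B =====
-- Python set equality and strict proper subset `t < s`
def pyEq (a b : List String) : Bool := pySub a b && pySub b a
def pyProper (a b : List String) : Bool := pySub a b && !pySub b a

def bUniq : List (List String) → List (List String) → List (List String)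
  | u, [] => u
  | u, cs :: rest =>
    if u.any (fun t => pyEq t cs) then bUniq u rest else bUniq (u ++ [cs]) rest

def keepB (u : List (List String)) (s : List String) : Bool :=
  ! u.any (fun t => pyProper t s)

def minimize_cut_sets_py_alt (cut_sets : List (List String)) : List (List String) :=
  let u := bUniq [] (PySem.List.sorted cut_sets (fun s => pyLen s))
  u.filter (fun s => keepB u s)

-- ===== PRECONDITION & SPEC =====
def Spec_minimize_cut_sets_py (cut_sets : List (List String)) (out : List (List String)) : Prop := out = minimize_cut_sets_py_alt cut_sets
instance (cut_sets : List (List String)) (out : List (List String)) : Decidable (Spec_minimize_cut_sets_py cut_sets out) := by unfold Spec_minimize_cut_sets_py; infer_instance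

-- ===== CLAIM (what is proved, stated in full; the proofs are below) =====
def Claim_equal_minimize_cut_sets_py : Prop := ∀ (cut_sets : List (List String)), Dom_minimize_cut_sets_py cut_sets → Spec_minimize_cut_sets_py cut_sets (minimize_cut_sets_py cut_sets)

-- ===== LEMMAS AND PROOFS =====

lemma pySub_iff (a b : List String) : pySub a b = true ↔ ∀ x ∈ a, x ∈ b := by
  simp [pySub, PySem.Set.issubset_iff, PySem.Set.mem_ofList]

lemma pySub_refl (a : List String) : pySub a a = true := by
  simp [pySub_iff]

lemma pySub_trans {a b c : List String} (h1 : pySub a b = true) (h2 : pySub b c = true) :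
    pySub a c = true := by
  rw [pySub_iff] at *
  exact fun x hx => h2 x (h1 x hx)

-- a strict proper subset has strictly fewer distinct elements
lemma pyProper_len_lt {a b : List String} (h : pyProper a b = true) : pyLen a < pyLen b := by
  simp only [pyProper, Bool.and_eq_true, Bool.not_eq_true'] at h
  obtain ⟨hab, hba⟩ := h
  rw [pySub_iff] at hab
  have hba' : ¬ ∀ x ∈ b, x ∈ a := by
    intro hc
    rw [← pySub_iff] at hc
    simp [hc] at hba
  have hssub : (PySem.Set.ofList a).toFinset ⊂ (PySem.Set.ofList b).toFinset := by
    constructor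
    · intro x hx
      simp only [List.mem_toFinset, PySem.Set.mem_ofList] at *
      exact hab x hx
    · intro hc
      apply hba'
      intro x hx
      have := hc (by simp [PySem.Set.mem_ofList, hx] : x ∈ (PySem.Set.ofList b).toFinset)
      simpa [PySem.Set.mem_ofList] using this
  have hc := Finset.card_lt_card hssub
  rwa [List.toFinset_card_of_nodup (PySem.Set.nodup_ofList a),
       List.toFinset_card_of_nodup (PySem.Set.nodup_ofList b)] at hc

lemma aInner_true (cs : List String) (L : List (List String)) : aInner cs L = true := by
  induction L with
  | nil => rfl
  | cons t ts ih => simp [aInner, ih]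

-- keepB does not change when a set at least as large as everything is appended
lemma keepB_append_big {U : List (List String)} {c s : List String}
    (hs : s ∈ U) (hlen : ∀ u ∈ U, pyLen u ≤ pyLen c) :
    keepB (U ++ [c]) s = keepB U s := by
  simp only [keepB, List.any_append, List.any_cons, List.any_nil, Bool.or_false]
  have : pyProper c s = false := by
    cases hp : pyProper c s with
    | false => rfl
    | true =>
      have := pyProper_len_lt hp
      have := hlen s hs
      omega
  simp [this]

lemma main_lemma (L : List (List String)) :
    ∀ (U M : List (List String)),
    L.Pairwise (fun a b => pyLen a ≤ pyLen b) →
    (∀ u ∈ U, ∀ c ∈ L, pyLen u ≤ pyLen c) →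
    M = U.filter (fun s => keepB U s) →
    (∀ u ∈ U, ∃ t ∈ M, pySub t u = true) →
    aLoop M L = (bUniq U L).filter (fun s => keepB (bUniq U L) s) := by
  induction L with
  | nil =>
    intro U M _ _ hM _
    simpa [aLoop, bUniq] using hM
  | cons cs rest ih =>
    intro U M hsort hUL hM hdom
    have hcs_le : ∀ b ∈ rest, pyLen cs ≤ pyLen b := (List.pairwise_cons.mp hsort).1
    have hsort' := (List.pairwise_cons.mp hsort).2
    have hU_le_cs : ∀ u ∈ U, pyLen u ≤ pyLen cs := fun u hu => hUL u hu cs (by simp)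
    have hUL' : ∀ u ∈ U, ∀ c ∈ rest, pyLen u ≤ pyLen c :=
      fun u hu c hc => hUL u hu c (by simp [hc])
    -- filter verdicts of old elements are unchanged by appending cs
    have hfilter_eq : U.filter (fun s => keepB (U ++ [cs]) s) = U.filter (fun s => keepB U s) := by
      apply List.filter_congr
      intro s hs
      exact keepB_append_big hs hU_le_cs
    by_cases hskip : (M.any (fun t => pySub t cs)) = true
    · -- A skips cs
      obtain ⟨t, htM, htcs⟩ := List.any_eq_true.mp hskip
      simp only [aLoop, hskip, if_true]
      by_cases hdup : (U.any (fun t => pyEq t cs)) = true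
      · -- duplicate: B also leaves U unchanged
        simp only [bUniq, hdup, if_true]
        exact ih U M hsort' hUL' hM hdom
      · -- new set, but not kept: t ∈ M, t ⊆ cs, t ≠set cs so t proper cs kills cs
        simp only [bUniq, hdup]
        have htU : t ∈ U := List.mem_of_mem_filter (hM ▸ htM)
        have htproper : pyProper t cs = true := by
          have : pyEq t cs = false := by
            cases h : pyEq t cs with
            | false => rfl
            | true => exact absurd (List.any_eq_true.mpr ⟨t, htU, h⟩) hdup
          simp only [pyEq] at this
          simp only [pyProper, Bool.and_eq_true, htcs, true_and, Bool.not_eq_true']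
          cases h2 : pySub cs t with
          | false => rfl
          | true => simp [htcs, h2] at this
        have hkeep_cs : keepB (U ++ [cs]) cs = false := by
          simp only [keepB, Bool.not_eq_eq_eq_not, Bool.not_false]
          exact List.any_eq_true.mpr ⟨t, by simp [htU], htproper⟩
        apply ih (U ++ [cs]) M hsort'
        · intro u hu c hc
          rcases List.mem_append.mp hu with h | h
          · exact hUL' u h c hc
          · simp at h; subst h; exact hcs_le c hc
        · rw [List.filter_append, hfilter_eq, ← hM]
          simp [hkeep_cs]
        · intro u hu
          rcases List.mem_append.mp hu with h | h
          · exact hdom u h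
          · simp at h; subst h; exact ⟨t, htM, htcs⟩
    · -- A keeps cs
      have hdup : (U.any (fun t => pyEq t cs)) = false := by
        cases h : U.any (fun t => pyEq t cs) with
        | false => rfl
        | true =>
          obtain ⟨u, huU, hueq⟩ := List.any_eq_true.mp h
          obtain ⟨t, htM, htu⟩ := hdom u huU
          simp only [pyEq, Bool.and_eq_true] at hueq
          have htcs : pySub t cs = true := pySub_trans htu hueq.1
          exact absurd (List.any_eq_true.mpr ⟨t, htM, htcs⟩) hskip
      have hnoprop : ∀ t ∈ U, pyProper t cs = false := by
        intro t htU
        cases h : pyProper t cs with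
        | false => rfl
        | true =>
          obtain ⟨r, hrM, hrt⟩ := hdom t htU
          simp only [pyProper, Bool.and_eq_true] at h
          have hrcs : pySub r cs = true := pySub_trans hrt h.1
          exact absurd (List.any_eq_true.mpr ⟨r, hrM, hrcs⟩) hskip
      simp only [aLoop, hskip, aInner_true, if_true, bUniq, hdup]
      have hkeep_cs : keepB (U ++ [cs]) cs = true := by
        simp only [keepB, Bool.not_eq_eq_eq_not, Bool.not_true, List.any_eq_false]
        intro t ht
        rcases List.mem_append.mp ht with h | h
        · simp [hnoprop t h]
        · simp only [List.mem_singleton] at h; subst h; simp [pyProper, pySub_refl]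
      apply ih (U ++ [cs]) (M ++ [cs]) hsort'
      · intro u hu c hc
        rcases List.mem_append.mp hu with h | h
        · exact hUL' u h c hc
        · simp at h; subst h; exact hcs_le c hc
      · rw [List.filter_append, hfilter_eq, ← hM]
        simp [hkeep_cs]
      · intro u hu
        rcases List.mem_append.mp hu with h | h
        · obtain ⟨t, htM, htu⟩ := hdom u h
          exact ⟨t, by simp [htM], htu⟩
        · simp only [List.mem_singleton] at h
          exact ⟨u, by simp [h], pySub_refl u⟩

-- ===== VERDICT (by name: the statement is the Claim_ definition above) =====
theorem minimize_cut_sets_py_spec : Claim_equal_minimize_cut_sets_py := by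
  intro cut_sets _
  unfold Spec_minimize_cut_sets_py minimize_cut_sets_py minimize_cut_sets_py_alt
  by_cases h : cut_sets.isEmpty
  · have : cut_sets = [] := List.isEmpty_iff.mp h
    subst this
    rfl
  · simp only [h]
    exact main_lemma (PySem.List.sorted cut_sets (fun s => pyLen s)) [] []
      (PySem.List.sorted_pairwise cut_sets (fun s => pyLen s))
      (by simp) rfl (by simp)
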